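-- pv_equiv track=rewrite | github.com/PDinesen/AdventofCode | 2023/day11.py | double_row_column
-- ===== SOURCE A (Python) =====
-- def transpose(lst):
--     trans = []
--     for j in range(len(lst[0])):
--         temp = ''
--         for i in range(len(lst)):
--             temp += lst[i][j]
--         trans.append(temp)
--     return trans
--
-- def double_row_column(lst):
--
--     for i in range(2):
--         result = []
--         for line in lst:
--             result.append(line)
--             if line.count('#') == 0:
--                 result.append(line)
--         lst = transpose(result)
--     return lst
-- ===== SOURCE B (Python) =====
-- def double_row_column(lst):
--     width = len(lst[0])
--     empty_cols = [j for j in range(width) if all(row[j] != '#' for row in lst)]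
--     out = []
--     for row in lst:
--         new_line = ''.join(2 * row[j] if j in empty_cols else row[j] for j in range(width))
--         out.append(new_line)
--         if '#' not in row:
--             out.append(new_line)
--     return out
-- ===== Notes on version B (the rewrite author's own statement) =====
-- stated objective: simpler
-- what changed: A duplicates empty rows, transposes, duplicates empty rows of the transpose and transposes back (four intermediate grids); B computes the empty-column index list once and builds the result in a single pass over the rows, doubling each character that sits in an empty column and appending empty rows twice, with no transpose at all.
import Mathlib
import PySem

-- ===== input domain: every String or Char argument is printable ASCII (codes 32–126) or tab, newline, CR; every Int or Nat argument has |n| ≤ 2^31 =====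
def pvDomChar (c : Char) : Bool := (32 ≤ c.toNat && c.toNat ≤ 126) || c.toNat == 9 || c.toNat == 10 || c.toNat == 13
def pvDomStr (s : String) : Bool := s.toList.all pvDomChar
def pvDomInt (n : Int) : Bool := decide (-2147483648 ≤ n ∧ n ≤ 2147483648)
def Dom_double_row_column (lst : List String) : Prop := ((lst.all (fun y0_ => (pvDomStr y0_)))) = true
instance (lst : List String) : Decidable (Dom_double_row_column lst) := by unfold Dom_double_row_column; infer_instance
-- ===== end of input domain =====

-- B replaces A's duplicate-rows / transpose / duplicate-rows / transpose dance by one precomputed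
-- empty-column index list and a single pass over the rows (objective: simpler).

-- ===== PORT A =====
-- transpose: temp is accumulated as a List Char (Python's str += char; Lean's String append is
-- kernel-opaque), String.ofList applied once per column. lst[0], lst[i], lst[i][j] are PySem
-- lookups; the .getD defaults are only reached where Python raises IndexError (outside Pre_).
def pvTranspose (lst : List String) : List String :=
  (PySem.List.pyRange 0 (PySem.Str.len (PySem.List.pyGetD lst 0 "")) 1).foldl
    (fun trans j =>
      trans ++ [String.ofList
        ((PySem.List.pyRange 0 (PySem.List.len lst) 1).foldl
          (fun temp i => temp ++ [(PySem.Str.pyGet? (PySem.List.pyGetD lst i "") j).getD ' ']) [])])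
    []

def double_row_column (lst : List String) : List String :=
  (PySem.List.pyRange 0 2 1).foldl
    (fun lst _ =>
      pvTranspose
        (lst.foldl
          (fun result line =>
            (result ++ [line]) ++ (if PySem.Str.count line "#" == 0 then [line] else []))
          []))
    lst

-- ===== PORT B =====
def double_row_column_alt (lst : List String) : List String :=
  let width := PySem.Str.len (PySem.List.pyGetD lst 0 "")
  let emptyCols : List Int :=
    (PySem.List.pyRange 0 width 1).filter
      (fun j => lst.all (fun row => (PySem.Str.pyGet? row j).getD ' ' != '#'))
  lst.foldl
    (fun out row =>
      let newLine := String.ofList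
        ((PySem.List.pyRange 0 width 1).foldl
          (fun acc j => acc ++
            (if emptyCols.contains j
             then [(PySem.Str.pyGet? row j).getD ' ', (PySem.Str.pyGet? row j).getD ' ']
             else [(PySem.Str.pyGet? row j).getD ' '])) [])
      (out ++ [newLine]) ++ (if !PySem.Str.isIn "#" row then [newLine] else []))
    []

-- ===== PRECONDITION & SPEC =====
-- Pre_ is exactly where A returns: on the empty list, zero-width grids, and grids with a row
-- shorter than the first, A (and B) raise IndexError; rows longer than the first are fine (both
-- programs read only the first len(lst[0]) columns).
def Pre_double_row_column (lst : List String) : Prop :=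
  lst ≠ [] ∧ 0 < (lst.headD "").toList.length ∧
    ∀ s ∈ lst, (lst.headD "").toList.length ≤ s.toList.length
instance (lst : List String) : Decidable (Pre_double_row_column lst) := by
  unfold Pre_double_row_column; infer_instance
def pvWitness_double_row_column : List String := ["#.", ".."]
def Spec_double_row_column (lst : List String) (out : List String) : Prop :=
  out = double_row_column_alt lst
instance (lst : List String) (out : List String) : Decidable (Spec_double_row_column lst out) := by
  unfold Spec_double_row_column; infer_instance

-- ===== CLAIM (what is proved, stated in full; the proofs are below) =====
def Claim_equal_double_row_column : Prop :=
  ∀ (lst : List String), Dom_double_row_column lst → Pre_double_row_column lst →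
    Spec_double_row_column lst (double_row_column lst)

-- ===== LEMMAS AND PROOFS =====

-- the duplication test of A ("no '#' in the line")
def pvC (line : String) : Bool := PySem.Str.count line "#" == 0
-- one duplication step of A, row-wise
def pvG (line : String) : List String := line :: if pvC line then [line] else []
-- column j of the grid as chars
def pvCol (lst : List String) (j : Nat) : List Char :=
  lst.map (fun s => s.toList.getD j ' ')
-- whether column j holds no '#'
def pvColEmpty (lst : List String) (j : Nat) : Bool :=
  lst.all (fun s => s.toList.getD j ' ' != '#')

lemma pvCountGo (fuel : Nat) : ∀ (l : List Char) (acc : Nat), l.length ≤ fuel →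
    PySem.Chars.count.go ['#'] fuel l acc = acc + l.count '#' := by
  induction fuel with
  | zero =>
    intro l acc h
    have : l = [] := List.eq_nil_of_length_eq_zero (Nat.le_zero.mp h)
    subst this; simp [PySem.Chars.count.go]
  | succ n ih =>
    intro l acc h
    cases l with
    | nil => simp [PySem.Chars.count.go]
    | cons c t =>
      simp only [PySem.Chars.count.go, List.isPrefixOf, Bool.and_true]
      by_cases hc : c = '#'
      · subst hc
        simp only [beq_self_eq_true, if_pos]
        rw [ih _ _ (by simpa using Nat.le_of_succ_le_succ h)]
        simp
        omega
      · rw [if_neg (by simp; exact fun e => hc e.symm)]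
        rw [ih _ _ (Nat.le_of_succ_le_succ (by simpa using h))]
        simp [hc]

lemma pvCount0_iff (s : String) : (PySem.Str.count s "#" == 0) = !decide ('#' ∈ s.toList) := by
  have ht : ("#" : String).toList = ['#'] := rfl
  rw [PySem.Str.count_eq, ht]
  unfold PySem.Chars.count
  rw [if_neg (by simp)]
  rw [pvCountGo _ _ _ (le_refl _)]
  by_cases h : '#' ∈ s.toList <;> simp [h, List.count_eq_zero]

lemma pvIsIn_iff (s : String) : PySem.Str.isIn "#" s = decide ('#' ∈ s.toList) := by
  have ht : ("#" : String).toList = ['#'] := rfl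
  by_cases h : '#' ∈ s.toList
  · simp only [h, decide_true]
    rw [PySem.Str.isIn_iff_infix, ht]
    simp [List.singleton_infix_iff, h]
  · simp only [h, decide_false]
    rw [← Bool.not_eq_true, PySem.Str.isIn_iff_infix, ht]
    simp [List.singleton_infix_iff, h]

lemma pvFoldlDup {α β : Type} (f : α → β) (c : α → Bool) (l : List α) (init : List β) :
    l.foldl (fun r x => (r ++ [f x]) ++ (if c x then [f x] else [])) init
      = init ++ l.flatMap (fun x => f x :: if c x then [f x] else []) := by
  induction l generalizing init with
  | nil => simp
  | cons a l ih => simp [List.flatMap_def]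

lemma pvTranspose_eq (lst : List String) :
    pvTranspose lst
      = (List.range (PySem.List.pyGetD lst 0 "").toList.length).map
          (fun j => String.ofList (pvCol lst j)) := by
  unfold pvTranspose
  have h1 : ∀ j : Int,
      (PySem.List.pyRange 0 (PySem.List.len lst) 1).foldl
        (fun temp i => temp ++ [(PySem.Str.pyGet? (PySem.List.pyGetD lst i "") j).getD ' ']) []
      = List.map (fun s => (PySem.Str.pyGet? s j).getD ' ') lst := by
    intro j
    rw [PySem.List.foldl_pyRange_zero_pyGetD lst ""
        (fun temp s => temp ++ [(PySem.Str.pyGet? s j).getD ' ']) [],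
        PySem.List.foldl_append_singleton_eq_map]
    simp
  simp only [h1]
  rw [PySem.List.foldl_append_singleton_eq_map
        (fun j => String.ofList (List.map (fun s => (PySem.Str.pyGet? s j).getD ' ') lst))]
  simp only [List.nil_append, PySem.List.pyRange_one, PySem.Str.len_eq]
  simp [List.map_map, pvCol, Function.comp, List.getD_eq_getElem?_getD]

lemma pvMapRange {α β : Type} (l : List α) (d : α) (F : α → β) :
    (List.range l.length).map (fun i => F (l.getD i d)) = l.map F := by
  apply List.ext_getElem
  · simp
  · intro i h1 h2
    simp only [List.getElem_map, List.getElem_range, List.getD_eq_getElem?_getD]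
    rw [List.getElem?_eq_getElem (by simpa using h1)]
    rfl

lemma pvMemFlatMapG (x : String) (lst : List String) :
    x ∈ lst.flatMap pvG ↔ x ∈ lst := by
  simp only [List.mem_flatMap, pvG]
  constructor
  · rintro ⟨l, hl, hx⟩
    cases h : pvC l <;> simp [h] at hx <;> simp [hx, hl]
  · intro hx
    exact ⟨x, hx, by simp⟩

lemma pvColEmpty_dup (lst : List String) (j : Nat) :
    pvC (String.ofList (pvCol (lst.flatMap pvG) j)) = pvColEmpty lst j := by
  unfold pvC pvColEmpty
  rw [pvCount0_iff, String.toList_ofList]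
  have hm : ('#' ∈ pvCol (lst.flatMap pvG) j) ↔ ('#' ∈ pvCol lst j) := by
    simp only [pvCol, List.mem_map]
    constructor
    · rintro ⟨a, ha, he⟩; exact ⟨a, (pvMemFlatMapG a lst).mp ha, he⟩
    · rintro ⟨a, ha, he⟩; exact ⟨a, (pvMemFlatMapG a lst).mpr ha, he⟩
  rw [show decide ('#' ∈ pvCol (lst.flatMap pvG) j) = decide ('#' ∈ pvCol lst j) from by
    simp [hm]]
  by_cases h : '#' ∈ pvCol lst j
  · simp only [h, decide_true, Bool.not_true]
    symm; rw [List.all_eq_false]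
    simp only [pvCol, List.mem_map] at h
    obtain ⟨s, hs, he⟩ := h
    exact ⟨s, hs, by simpa [List.getD_eq_getElem?_getD] using he⟩
  · simp only [h, decide_false, Bool.not_false]
    symm; rw [List.all_eq_true]
    intro s hs
    simp only [bne_iff_ne, ne_eq]
    intro he
    exact h (by simp only [pvCol, List.mem_map]; exact ⟨s, hs, he⟩)

-- B-side helpers, named so the proof can speak about them (definitionally the let-bound values)
def pvEmptyCols (lst : List String) : List Int :=
  (PySem.List.pyRange 0 (PySem.Str.len (PySem.List.pyGetD lst 0 "")) 1).filter
    (fun j => lst.all (fun row => (PySem.Str.pyGet? row j).getD ' ' != '#'))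

def pvNB (lst : List String) (row : String) : List Char :=
  (PySem.List.pyRange 0 (PySem.Str.len (PySem.List.pyGetD lst 0 "")) 1).foldl
    (fun acc j => acc ++
      (if (pvEmptyCols lst).contains j
       then [(PySem.Str.pyGet? row j).getD ' ', (PySem.Str.pyGet? row j).getD ' ']
       else [(PySem.Str.pyGet? row j).getD ' '])) []

-- the common expanded-row value (indices read off the original grid)
def pvFA (lst : List String) (row : String) : List Char :=
  (List.range (lst.headD "").toList.length).flatMap
    (fun j => row.toList.getD j ' ' ::
      if pvColEmpty lst j then [row.toList.getD j ' '] else [])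

lemma pvContains_eq (a : String) (t : List String) (k : Nat) (hk : k < a.toList.length) :
    (pvEmptyCols (a :: t)).contains ((k : Nat) : Int) = pvColEmpty (a :: t) k := by
  have hmem : ((k : Int) ∈ PySem.List.pyRange 0 (a.toList.length : Int) 1) := by
    rw [PySem.List.mem_pyRange_one]
    constructor
    · positivity
    · exact_mod_cast hk
  have hpk : ∀ row : String,
      ((PySem.Str.pyGet? row ((k : Nat) : Int)).getD ' ' != '#')
        = (row.toList.getD k ' ' != '#') := by
    intro row
    rw [PySem.Str.pyGet?_natCast]
    simp [List.getD_eq_getElem?_getD]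
  rw [show (pvEmptyCols (a :: t)).contains ((k : Nat) : Int)
      = decide ((k : Int) ∈ pvEmptyCols (a :: t)) from by simp]
  unfold pvEmptyCols pvColEmpty
  rw [show PySem.List.pyGetD (a :: t) 0 "" = a from PySem.List.pyGetD_zero_cons a t ""]
  rw [PySem.Str.len_eq]
  have hiff : ((k : Int) ∈ (PySem.List.pyRange 0 (a.toList.length : Int) 1).filter
      (fun j => (a :: t).all (fun row => (PySem.Str.pyGet? row j).getD ' ' != '#')))
      ↔ (((a :: t).all (fun row => (PySem.Str.pyGet? row ((k : Nat) : Int)).getD ' ' != '#')) = true) := by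
    rw [List.mem_filter]
    constructor
    · rintro ⟨_, hp⟩; exact hp
    · intro hp; exact ⟨hmem, hp⟩
  rw [decide_eq_decide.mpr hiff]
  rw [Bool.decide_eq_true]
  congr 1
  funext row
  exact hpk row

lemma pvNB_eq_pvFA (a : String) (t : List String) (row : String) :
    pvNB (a :: t) row = pvFA (a :: t) row := by
  unfold pvNB
  rw [show PySem.List.pyGetD (a :: t) 0 "" = a from PySem.List.pyGetD_zero_cons a t "",
      PySem.Str.len_eq]
  rw [PySem.List.foldl_append_eq_flatMap
      (fun j : Int => if (pvEmptyCols (a :: t)).contains j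
        then [(PySem.Str.pyGet? row j).getD ' ', (PySem.Str.pyGet? row j).getD ' ']
        else [(PySem.Str.pyGet? row j).getD ' '])]
  rw [List.nil_append, PySem.List.pyRange_one, List.flatMap_map]
  unfold pvFA
  simp only [List.headD_cons, Int.sub_zero, Int.toNat_natCast]
  apply List.flatMap_congr
  intro j hj
  have hj' := List.mem_range.mp hj
  simp only [zero_add]
  rw [pvContains_eq a t j hj', PySem.Str.pyGet?_natCast]
  cases h : pvColEmpty (a :: t) j <;> simp [List.getD_eq_getElem?_getD]

lemma pvColEntry (L : List String) (i : Nat) (hi : i < L.length) (j : Nat) :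
    (pvCol L j).getD i ' ' = (L.getD i "").toList.getD j ' ' := by
  unfold pvCol
  rw [List.getD_eq_getElem?_getD, List.getElem?_map, List.getElem?_eq_getElem hi,
      List.getD_eq_getElem?_getD (l := L), List.getElem?_eq_getElem hi]
  simp

lemma pvB_eq (lst : List String) :
    double_row_column_alt lst
      = lst.flatMap (fun row => String.ofList (pvNB lst row) ::
          if !PySem.Str.isIn "#" row then [String.ofList (pvNB lst row)] else []) := by
  unfold double_row_column_alt pvNB pvEmptyCols
  rw [pvFoldlDup
      (fun row : String => String.ofList
        ((PySem.List.pyRange 0 (PySem.Str.len (PySem.List.pyGetD lst 0 "")) 1).foldl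
          (fun acc j => acc ++
            (if (((PySem.List.pyRange 0 (PySem.Str.len (PySem.List.pyGetD lst 0 "")) 1).filter
              (fun j => lst.all (fun r => (PySem.Str.pyGet? r j).getD ' ' != '#'))).contains j)
             then [(PySem.Str.pyGet? row j).getD ' ', (PySem.Str.pyGet? row j).getD ' ']
             else [(PySem.Str.pyGet? row j).getD ' '])) []))
      (fun row => !PySem.Str.isIn "#" row) lst []]
  simp

set_option maxHeartbeats 2000000 in
theorem double_row_column_spec : Claim_equal_double_row_column := by
  unfold Claim_equal_double_row_column
  intro lst _ hpre
  obtain ⟨hne, hw, -⟩ := hpre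
  unfold Spec_double_row_column
  -- ---- A unfolded to dup/transpose/dup/transpose ----
  have hdup : ∀ (l : List String),
      l.foldl (fun result line =>
        (result ++ [line]) ++ (if PySem.Str.count line "#" == 0 then [line] else [])) []
        = l.flatMap pvG := by
    intro l
    have h := pvFoldlDup (fun x => x) pvC l []
    simpa only [pvC, pvG, List.nil_append] using h
  have hA : double_row_column lst
      = pvTranspose (((pvTranspose (lst.flatMap pvG))).flatMap pvG) := by
    unfold double_row_column
    rw [show PySem.List.pyRange 0 2 1 = [0, 1] from by decide]
    simp only [List.foldl_cons, List.foldl_nil]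
    rw [hdup, hdup]
  cases lst with
  | nil => exact absurd rfl hne
  | cons a t =>
  simp only [List.headD_cons] at hw
  -- ---- heads of the intermediate grids ----
  have hhead1 : PySem.List.pyGetD ((a :: t).flatMap pvG) 0 "" = a := by
    cases h : pvC a <;>
      simp [pvG, List.flatMap_cons, List.cons_append, PySem.List.pyGetD_zero_cons]
  have hT1 : pvTranspose ((a :: t).flatMap pvG)
      = (List.range a.toList.length).map
          (fun j => String.ofList (pvCol ((a :: t).flatMap pvG) j)) := by
    rw [pvTranspose_eq, hhead1]
  have hhead2 : PySem.List.pyGetD ((pvTranspose ((a :: t).flatMap pvG)).flatMap pvG) 0 ""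
      = String.ofList (pvCol ((a :: t).flatMap pvG) 0) := by
    rw [hT1]
    obtain ⟨w', hw'⟩ : ∃ w', a.toList.length = w' + 1 :=
      ⟨a.toList.length - 1, by omega⟩
    rw [hw', List.range_succ_eq_map]
    cases h : pvC (String.ofList (pvCol ((a :: t).flatMap pvG) 0)) <;>
      simp [pvG, List.flatMap_cons, List.cons_append, PySem.List.pyGetD_zero_cons]
  have hA2 : double_row_column (a :: t)
      = (List.range ((a :: t).flatMap pvG).length).map
          (fun i => String.ofList
            (pvCol ((pvTranspose ((a :: t).flatMap pvG)).flatMap pvG) i)) := by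
    have hlen2 : (String.ofList (pvCol ((a :: t).flatMap pvG) 0)).toList.length
        = ((a :: t).flatMap pvG).length := by
      rw [String.toList_ofList]; simp [pvCol]
    rw [hA, pvTranspose_eq, hhead2, hlen2]
  -- ---- columns of the second duplication ----
  have hcol2 : ∀ i : Nat,
      pvCol ((pvTranspose ((a :: t).flatMap pvG)).flatMap pvG) i
        = (List.range a.toList.length).flatMap
            (fun j => (pvCol ((a :: t).flatMap pvG) j).getD i ' ' ::
              if pvColEmpty (a :: t) j then
                [(pvCol ((a :: t).flatMap pvG) j).getD i ' '] else []) := by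
    intro i
    rw [show pvCol ((pvTranspose ((a :: t).flatMap pvG)).flatMap pvG) i
        = ((pvTranspose ((a :: t).flatMap pvG)).flatMap pvG).map
            (fun s => s.toList.getD i ' ') from rfl]
    rw [hT1, List.map_flatMap, List.flatMap_map]
    apply List.flatMap_congr
    intro j _
    rw [← pvColEmpty_dup (a :: t) j]
    cases h : pvC (String.ofList (pvCol ((a :: t).flatMap pvG) j)) <;>
      simp only [pvG, h, Bool.false_eq_true, if_false, if_true, List.map_cons, List.map_nil,
        String.toList_ofList]
  have hentry : ∀ i, i < ((a :: t).flatMap pvG).length → ∀ j : Nat,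
      (pvCol ((a :: t).flatMap pvG) j).getD i ' '
        = (((a :: t).flatMap pvG).getD i "").toList.getD j ' ' := by
    intro i hi j
    exact pvColEntry _ i hi j
  -- ---- A as one pass over the duplicated rows ----
  have hAfinal : double_row_column (a :: t)
      = ((a :: t).flatMap pvG).map (fun row => String.ofList (pvFA (a :: t) row)) := by
    rw [hA2, ← pvMapRange ((a :: t).flatMap pvG) ""
        (fun row => String.ofList (pvFA (a :: t) row))]
    apply List.map_congr_left
    intro i hi
    rw [hcol2 i]
    unfold pvFA
    simp only [List.headD_cons]
    apply congrArg
    apply List.flatMap_congr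
    intro j _
    rw [hentry i (List.mem_range.mp hi) j]
  have hAfm : ((a :: t).flatMap pvG).map (fun row => String.ofList (pvFA (a :: t) row))
      = (a :: t).flatMap (fun line => String.ofList (pvFA (a :: t) line) ::
          if pvC line then [String.ofList (pvFA (a :: t) line)] else []) := by
    rw [List.map_flatMap]
    apply List.flatMap_congr
    intro line _
    cases h : pvC line <;> simp [pvG, h]
  -- ---- B as the same pass ----
  have hB := pvB_eq (a :: t)
  -- ---- conclude ----
  rw [hAfinal, hAfm, hB]
  apply List.flatMap_congr
  intro row hm
  rw [pvNB_eq_pvFA a t row]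
  rw [show pvC row = !PySem.Str.isIn "#" row from by
    unfold pvC; rw [pvCount0_iff, pvIsIn_iff]]
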